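-- pv_equiv track=rewrite | github.com/rmfulton/BenjaminProblem | solution.py | peter_knows_given_samantha_knows_he_doesnt_know
-- ===== SOURCE A (Python) =====
-- def all_pairs(start=3, stop=97):
--     pairs = []
--     for x in range(start, stop+1):
--         for y in range(x, stop+1):
--             pairs.append((x,y))
--     return pairs
--
-- def peter_doesnt_know_x_and_y_pairs(start=3, stop=97):
--     pairs = all_pairs(start, stop)
--     allPairsThatMultiplyToP = get_all_pairs_that_multiply_to_p( pairs )
--
--     return get_ambiguous_product_pairs(allPairsThatMultiplyToP)
--
-- def samantha_knows_that_peter_doesnt_know_x_and_y_pairs(start=3, stop=97):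
--     ambiguous_product_pairs = peter_doesnt_know_x_and_y_pairs(start, stop)
--     allPairsThatAddToS = get_all_pairs_that_add_to_s(all_pairs(start, stop))
--
--     res = []
--     for pairs in allPairsThatAddToS.values():
--         peter_doesnt_know = lambda x: x in ambiguous_product_pairs
--         if all(map(peter_doesnt_know, pairs)):
--             res += pairs
--     return res
--
-- def peter_knows_given_samantha_knows_he_doesnt_know(start=3, stop=97):
--     possible_pairs = samantha_knows_that_peter_doesnt_know_x_and_y_pairs(start, stop)
--     allPossiblePairsThatMultiplyToP = get_all_pairs_that_multiply_to_p(possible_pairs)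
--
--     remaining_pairs = []
--
--     for pairs in allPossiblePairsThatMultiplyToP.values():
--         if len(pairs) == 1:
--             remaining_pairs.append(pairs[0])
--
--     return remaining_pairs
--
-- def get_all_pairs_that_multiply_to_p(pairs):
--     allPairsThatMultiplyToP = dict()
--     for pair in pairs:
--         product = pair[0]*pair[1]
--         if product not in allPairsThatMultiplyToP:
--             allPairsThatMultiplyToP[product] = []
--         allPairsThatMultiplyToP[product].append(pair)
--     return allPairsThatMultiplyToP
--
-- def get_all_pairs_that_add_to_s(pairs):
--     allPairsThatAddToS = dict()
--     for pair in pairs: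
--         s = pair[0]+pair[1]
--         if s not in allPairsThatAddToS:
--             allPairsThatAddToS[s] = []
--         allPairsThatAddToS[s].append(pair)
--     return allPairsThatAddToS
--
-- def get_ambiguous_product_pairs(allPairsThatMultiplyToP):
--     ambiguous_product_pairs = []
--     for L in allPairsThatMultiplyToP.values():
--         if len(L) > 1:
--             ambiguous_product_pairs += L
--     return ambiguous_product_pairs
-- ===== SOURCE B (Python) =====
-- def peter_knows_given_samantha_knows_he_doesnt_know(start=3, stop=97):
--     pairs = [(x, y) for x in range(start, stop + 1) for y in range(x, stop + 1)]
--
--     # A product is ambiguous iff it occurs more than once: sort the products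
--     # and collect every value that equals its successor.
--     prods = sorted(x * y for x, y in pairs)
--     ambiguous = {a for a, b in zip(prods, prods[1:]) if a == b}
--
--     # Samantha's statement: keep the sum-groups (scanned off the pair list,
--     # in first-occurrence order of the sum) all of whose pairs are ambiguous.
--     possible = []
--     seen_sums = set()
--     for q in pairs:
--         s = q[0] + q[1]
--         if s not in seen_sums:
--             seen_sums.add(s)
--             group = [r for r in pairs if r[0] + r[1] == s]
--             if all(r[0] * r[1] in ambiguous for r in group):
--                 possible += group
--     # Peter now knows: keep each possible pair whose product is unique among
--     # the possible pairs, in first-occurrence-by-product order.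
--     out = []
--     seen_prods = set()
--     for q in possible:
--         p = q[0] * q[1]
--         if p not in seen_prods:
--             seen_prods.add(p)
--             if sum(1 for r in possible if r[0] * r[1] == p) == 1:
--                 out.append(q)
--     return out
-- ===== Notes on version B (the rewrite author's own statement) =====
-- stated objective: alternative
-- what changed: Replaces A's three dict-grouping pipelines with direct scans over the pair list: duplicate products are found by sorting the product list and collecting values equal to their successor, and both filtering stages walk the pairs once with a seen-set, recomputing each sum-group / product-count by a predicate scan in first-occurrence order.
import Mathlib
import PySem

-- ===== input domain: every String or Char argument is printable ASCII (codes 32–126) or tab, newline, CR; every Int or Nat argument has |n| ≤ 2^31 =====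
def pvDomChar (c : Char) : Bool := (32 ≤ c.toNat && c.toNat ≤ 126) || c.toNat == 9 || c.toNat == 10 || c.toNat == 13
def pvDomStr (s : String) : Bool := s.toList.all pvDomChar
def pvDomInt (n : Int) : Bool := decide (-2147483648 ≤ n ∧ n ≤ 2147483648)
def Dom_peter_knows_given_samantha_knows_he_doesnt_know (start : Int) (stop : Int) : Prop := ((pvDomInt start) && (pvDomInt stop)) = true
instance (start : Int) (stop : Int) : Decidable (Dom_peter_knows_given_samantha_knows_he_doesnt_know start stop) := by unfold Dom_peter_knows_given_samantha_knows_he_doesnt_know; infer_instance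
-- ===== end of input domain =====

-- B replaces A's dict-grouping pipelines by sort-and-scan duplicate detection plus
-- seen-set scans over the pair list (objective: alternative, same result, similar cost).

-- ===== PORT A =====
def all_pairs (start : Int) (stop : Int) : List (Int × Int) :=
  (PySem.List.pyRange start (stop + 1) 1).foldl (fun pairs x =>
    (PySem.List.pyRange x (stop + 1) 1).foldl (fun pairs y => pairs ++ [(x, y)]) pairs) []

-- if product not in d: d[product] = [] ; d[product].append(pair)  — the append is Dict.modify
def get_all_pairs_that_multiply_to_p (pairs : List (Int × Int)) :
    PySem.Dict Int (List (Int × Int)) :=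
  pairs.foldl (fun d pair =>
    (if d.contains (pair.1 * pair.2) then d else d.insert (pair.1 * pair.2) []).modify
      (pair.1 * pair.2) [] (fun L => L ++ [pair])) PySem.Dict.empty

def get_all_pairs_that_add_to_s (pairs : List (Int × Int)) :
    PySem.Dict Int (List (Int × Int)) :=
  pairs.foldl (fun d pair =>
    (if d.contains (pair.1 + pair.2) then d else d.insert (pair.1 + pair.2) []).modify
      (pair.1 + pair.2) [] (fun L => L ++ [pair])) PySem.Dict.empty

def get_ambiguous_product_pairs (d : PySem.Dict Int (List (Int × Int))) : List (Int × Int) :=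
  d.values.foldl (fun acc L => if 1 < L.length then acc ++ L else acc) []

def peter_doesnt_know_x_and_y_pairs (start : Int) (stop : Int) : List (Int × Int) :=
  get_ambiguous_product_pairs (get_all_pairs_that_multiply_to_p (all_pairs start stop))

def samantha_knows_that_peter_doesnt_know_x_and_y_pairs (start : Int) (stop : Int) :
    List (Int × Int) :=
  let amb := peter_doesnt_know_x_and_y_pairs start stop
  (get_all_pairs_that_add_to_s (all_pairs start stop)).values.foldl
    (fun res L => if L.all (fun x => amb.contains x) then res ++ L else res) []

def peter_knows_given_samantha_knows_he_doesnt_know (start : Int) (stop : Int) :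
    List (Int × Int) :=
  let possible := samantha_knows_that_peter_doesnt_know_x_and_y_pairs start stop
  -- pairs[0] under the len == 1 guard: pyGet? … 0 is some there, Option.toList appends it
  (get_all_pairs_that_multiply_to_p possible).values.foldl
    (fun acc L => if L.length == 1 then acc ++ (PySem.List.pyGet? L 0).toList else acc) []

-- ===== PORT B =====
def peter_knows_given_samantha_knows_he_doesnt_know_alt (start : Int) (stop : Int) :
    List (Int × Int) :=
  let pairs := (PySem.List.pyRange start (stop + 1) 1).flatMap (fun x =>
    (PySem.List.pyRange x (stop + 1) 1).map (fun y => (x, y)))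
  let prods := PySem.List.sorted (pairs.map (fun q => q.1 * q.2)) (fun v => v) false
  let ambiguous : PySem.Set Int :=
    ((prods.zip (PySem.List.slice prods (some 1) none)).foldl
      (fun s ab => if ab.1 == ab.2 then PySem.Set.add s ab.1 else s) PySem.Set.empty)
  let step1 := pairs.foldl (fun (st : PySem.Set Int × List (Int × Int)) q =>
      if PySem.Set.contains st.1 (q.1 + q.2) then st
      else
        (PySem.Set.add st.1 (q.1 + q.2),
         if (pairs.filter (fun r => r.1 + r.2 == q.1 + q.2)).all
              (fun r => PySem.Set.contains ambiguous (r.1 * r.2)) then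
           st.2 ++ pairs.filter (fun r => r.1 + r.2 == q.1 + q.2)
         else st.2)) (PySem.Set.empty, [])
  let possible := step1.2
  let step2 := possible.foldl (fun (st : PySem.Set Int × List (Int × Int)) q =>
      if PySem.Set.contains st.1 (q.1 * q.2) then st
      else
        (PySem.Set.add st.1 (q.1 * q.2),
         if possible.countP (fun r => r.1 * r.2 == q.1 * q.2) == 1 then st.2 ++ [q]
         else st.2)) (PySem.Set.empty, [])
  step2.2

-- ===== PRECONDITION & SPEC =====
def Spec_peter_knows_given_samantha_knows_he_doesnt_know (start : Int) (stop : Int) (out : List (Int × Int)) : Prop := out = peter_knows_given_samantha_knows_he_doesnt_know_alt start stop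
instance (start : Int) (stop : Int) (out : List (Int × Int)) : Decidable (Spec_peter_knows_given_samantha_knows_he_doesnt_know start stop out) := by unfold Spec_peter_knows_given_samantha_knows_he_doesnt_know; infer_instance

-- ===== CLAIM (what is proved, stated in full; the proofs are below) =====
def Claim_equal_peter_knows_given_samantha_knows_he_doesnt_know : Prop := ∀ (start : Int) (stop : Int), Dom_peter_knows_given_samantha_knows_he_doesnt_know start stop → Spec_peter_knows_given_samantha_knows_he_doesnt_know start stop (peter_knows_given_samantha_knows_he_doesnt_know start stop)

-- ===== LEMMAS AND PROOFS =====

theorem step_eq (d : PySem.Dict Int (List (Int × Int))) (k : Int) (g : List (Int × Int) → List (Int × Int)) :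
    (if d.contains k then d else d.insert k []).modify k [] g = d.modify k [] g := by
  by_cases h : d.contains k
  · simp [h]
  · simp only [h, Bool.false_eq_true, if_false]
    simp [PySem.Dict.modify, PySem.Dict.insert_insert_self, PySem.Dict.getD_insert_self,
      PySem.Dict.getD_of_not_contains, h]

theorem values_groupBy (f : Int × Int → Int) (L : List (Int × Int)) :
    (L.foldl (fun d pair =>
        (if d.contains (f pair) then d else d.insert (f pair) []).modify
          (f pair) [] (fun G => G ++ [pair])) PySem.Dict.empty).values
      = (PySem.Set.ofList (L.map f)).map (fun k => L.filter (fun r => f r == k)) := by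
  have h1 : (L.foldl (fun d pair =>
        (if d.contains (f pair) then d else d.insert (f pair) []).modify
          (f pair) [] (fun G => G ++ [pair])) PySem.Dict.empty)
      = L.foldl (fun d pair => d.modify (f pair) [] (fun G => G ++ [pair])) PySem.Dict.empty := by
    apply PySem.List.foldl_congr_mem
    intro d pair _
    exact step_eq d (f pair) _
  rw [h1]
  have hnd : (L.foldl (fun d pair => d.modify (f pair) [] (fun G => G ++ [pair])) PySem.Dict.empty).keys.Nodup := by
    apply PySem.Dict.nodup_keys_foldl_modify_key
    exact PySem.Dict.nodup_keys_empty
  have hkeys : (L.foldl (fun d pair => d.modify (f pair) [] (fun G => G ++ [pair])) PySem.Dict.empty).keys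
      = PySem.Set.ofList (L.map f) := by
    rw [PySem.Dict.keys_foldl_modify_key]
    simp [PySem.Set.update, PySem.Set.ofList, PySem.Dict.keys_empty]
  rw [PySem.Dict.values_eq_map_keys _ hnd [], hkeys]
  apply List.map_congr_left
  intro k hk
  have := PySem.Dict.getD_foldl_modify_append (l := L.map (fun q => (f q, q)))
      (d := PySem.Dict.empty) (c := k)
  rw [List.foldl_map] at this
  simp only [this]
  simp [PySem.Dict.getD_empty, List.filter_map, Function.comp_def]

def firstReps (f : Int × Int → Int) : PySem.Set Int → List (Int × Int) → List (Int × Int)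
  | _, [] => []
  | s, q :: L =>
    if PySem.Set.contains s (f q) then firstReps f s L
    else q :: firstReps f (PySem.Set.add s (f q)) L

theorem update_cons (s : PySem.Set Int) (k : Int) (ks : List Int) :
    PySem.Set.update s (k :: ks) = PySem.Set.update (PySem.Set.add s k) ks := by
  simp [PySem.Set.update]

theorem foldl_seen_loop (f : Int × Int → Int) (g : Int × Int → List (Int × Int)) :
    ∀ (L : List (Int × Int)) (s : PySem.Set Int) (acc : List (Int × Int)),
      L.foldl (fun (st : PySem.Set Int × List (Int × Int)) q =>
          if PySem.Set.contains st.1 (f q) then st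
          else (PySem.Set.add st.1 (f q), st.2 ++ g q)) (s, acc)
        = (PySem.Set.update s (L.map f), acc ++ (firstReps f s L).flatMap g) := by
  intro L
  induction L with
  | nil => intro s acc; simp [firstReps, PySem.Set.update]
  | cons q L ih =>
    intro s acc
    by_cases h : PySem.Set.contains s (f q)
    · have hadd : PySem.Set.add s (f q) = s :=
        PySem.Set.add_of_mem ((PySem.Set.contains_iff _ _).mp h)
      simp only [List.foldl_cons, h, if_true, firstReps, List.map_cons, ih,
        update_cons, hadd]
    · simp only [List.foldl_cons, h, Bool.false_eq_true, if_false, firstReps, List.map_cons,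
        ih, update_cons, List.flatMap_cons, List.append_assoc]

theorem map_firstReps (f : Int × Int → Int) :
    ∀ (L : List (Int × Int)) (s : PySem.Set Int),
      PySem.Set.update s (L.map f) = s ++ (firstReps f s L).map f := by
  intro L
  induction L with
  | nil => intro s; simp [firstReps, PySem.Set.update]
  | cons q L ih =>
    intro s
    by_cases h : PySem.Set.contains s (f q)
    · have hadd : PySem.Set.add s (f q) = s :=
        PySem.Set.add_of_mem ((PySem.Set.contains_iff _ _).mp h)
      simp only [List.map_cons, update_cons, hadd, firstReps, h, if_true, ih]
    · have hadd : PySem.Set.add s (f q) = s ++ [f q] := by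
        apply PySem.Set.add_of_not_mem
        intro hm; exact h ((PySem.Set.contains_iff _ _).mpr hm)
      simp only [List.map_cons, update_cons, firstReps, h, Bool.false_eq_true, if_false,
        hadd]
      rw [ih (s ++ [f q])]
      simp

theorem not_contains_of_mem_firstReps (f : Int × Int → Int) :
    ∀ (L : List (Int × Int)) (s : PySem.Set Int) (q : Int × Int),
      q ∈ firstReps f s L → PySem.Set.contains s (f q) = false := by
  intro L
  induction L with
  | nil => intro s q h; simp [firstReps] at h
  | cons r L ih =>
    intro s q h
    by_cases hc : PySem.Set.contains s (f r)
    · simp only [firstReps, hc, if_true] at h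
      exact ih _ _ h
    · simp only [firstReps, hc, Bool.false_eq_true, if_false, List.mem_cons] at h
      rcases h with h | h
      · rw [h]; simpa using hc
      · have h2 := ih _ _ h
        by_contra hb
        have hmem : f q ∈ s := (PySem.Set.contains_iff _ _).mp (by
          cases hcc : PySem.Set.contains s (f q)
          · exact absurd hcc hb
          · rfl)
        have : f q ∈ PySem.Set.add s (f r) := (PySem.Set.mem_add _ _ _).mpr (Or.inl hmem)
        rw [(PySem.Set.contains_iff _ _).mpr this] at h2
        simp at h2

theorem ne_key_of_mem_firstReps_add (f : Int × Int → Int) (L : List (Int × Int))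
    (s : PySem.Set Int) (r q : Int × Int)
    (h : q ∈ firstReps f (PySem.Set.add s (f r)) L) : f q ≠ f r := by
  have h2 := not_contains_of_mem_firstReps f L _ _ h
  intro he
  have : f q ∈ PySem.Set.add s (f r) := (PySem.Set.mem_add _ _ _).mpr (Or.inr he)
  rw [(PySem.Set.contains_iff _ _).mpr this] at h2
  simp at h2

theorem head_filter_firstReps (f : Int × Int → Int) :
    ∀ (L : List (Int × Int)) (s : PySem.Set Int) (q : Int × Int),
      q ∈ firstReps f s L → (L.filter (fun r => f r == f q)).head? = some q := by
  intro L
  induction L with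
  | nil => intro s q h; simp [firstReps] at h
  | cons r L ih =>
    intro s q h
    by_cases hc : PySem.Set.contains s (f r)
    · simp only [firstReps, hc, if_true] at h
      have hne : f r ≠ f q := by
        have h2 := not_contains_of_mem_firstReps f L s q h
        intro he; rw [← he] at h2; rw [hc] at h2; simp at h2
      simp only [List.filter_cons, beq_iff_eq, hne, if_false]
      exact ih _ _ h
    · simp only [firstReps, hc, Bool.false_eq_true, if_false, List.mem_cons] at h
      rcases h with h | h
      · subst h; simp
      · have hne : f r ≠ f q := fun he => (ne_key_of_mem_firstReps_add f L s r q h) he.symm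
        simp only [List.filter_cons, beq_iff_eq, hne, if_false]
        exact ih _ _ h

theorem mem_foldl_add_if :
    ∀ (l : List (Int × Int)) (s : PySem.Set Int) (x : Int),
    (x ∈ l.foldl (fun s ab => if ab.1 == ab.2 then PySem.Set.add s ab.1 else s) s
      ↔ x ∈ s ∨ ∃ ab ∈ l, ab.1 = ab.2 ∧ ab.1 = x) := by
  intro l
  induction l with
  | nil => intro s x; simp
  | cons ab l ih =>
    intro s x
    rw [List.foldl_cons]
    by_cases h : ab.1 = ab.2
    · rw [if_pos (by simpa using h), ih]
      simp only [PySem.Set.mem_add, List.mem_cons]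
      constructor
      · rintro ((hs | he) | ⟨c, hc, h1, h2⟩)
        · exact Or.inl hs
        · exact Or.inr ⟨ab, Or.inl rfl, h, he.symm⟩
        · exact Or.inr ⟨c, Or.inr hc, h1, h2⟩
      · rintro (hs | ⟨c, hc | hc, h1, h2⟩)
        · exact Or.inl (Or.inl hs)
        · exact Or.inl (Or.inr (by subst hc; exact h2.symm))
        · exact Or.inr ⟨c, hc, h1, h2⟩
    · rw [if_neg (by simpa using h), ih]
      simp only [List.mem_cons]
      constructor
      · rintro (hs | ⟨c, hc, h1, h2⟩)
        · exact Or.inl hs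
        · exact Or.inr ⟨c, Or.inr hc, h1, h2⟩
      · rintro (hs | ⟨c, hc | hc, h1, h2⟩)
        · exact Or.inl hs
        · exact absurd (by subst hc; exact h1) h
        · exact Or.inr ⟨c, hc, h1, h2⟩

theorem adj_dup_iff_two_le_count :
    ∀ (l : List Int), l.Pairwise (· ≤ ·) → ∀ x : Int,
      ((∃ ab ∈ l.zip l.tail, ab.1 = ab.2 ∧ ab.1 = x) ↔ 2 ≤ l.count x) := by
  intro l
  induction l with
  | nil => intro _ x; simp
  | cons a l ih =>
    intro hp x
    rcases l with _ | ⟨b, t⟩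
    · simp [List.count_cons]; split <;> omega
    · have hp' := hp.tail
      have hab : a ≤ b := (List.pairwise_cons.mp hp).1 b List.mem_cons_self
      simp only [List.tail_cons, List.zip_cons_cons, List.mem_cons] at *
      constructor
      · rintro ⟨ab, hab2, h1, h2⟩
        rcases hab2 with rfl | hm
        · -- adjacent at head: a = b = x
          simp only at h1 h2
          subst h2; rw [List.count_cons, List.count_cons, ← h1]
          simp
        · have := (ih hp' x).mp ⟨ab, hm, h1, h2⟩
          rw [List.count_cons]
          omega
      · intro hcnt
        by_cases hx : a = x
        · -- a = x; count x (b::t) ≥ 1 so x ∈ b::t; sortedness gives b = x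
          subst hx
          rw [List.count_cons_self] at hcnt
          have hmem : a ∈ b :: t := by
            rw [← List.count_pos_iff]; omega
          have hba : b ≤ a := by
            rcases List.mem_cons.mp hmem with rfl | hmt
            · exact le_refl _
            · exact le_trans ((List.pairwise_cons.mp hp').1 a hmt) (le_refl _)
          have : a = b := le_antisymm hab hba
          exact ⟨(a, b), Or.inl rfl, this, rfl⟩
        · rw [List.count_cons_of_ne hx] at hcnt
          obtain ⟨ab, hm, h1, h2⟩ := (ih hp' x).mpr hcnt
          exact ⟨ab, Or.inr hm, h1, h2⟩

-- generic reshapes of the three A-side folds over dict values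
theorem foldl_gate {α β : Type} (p : List α → Prop) [DecidablePred p] (g : List α → List β) :
    ∀ (V : List (List α)) (acc : List β),
      V.foldl (fun acc L => if p L then acc ++ g L else acc) acc
        = acc ++ V.flatMap (fun L => if p L then g L else []) := by
  intro V
  induction V with
  | nil => intro acc; simp
  | cons L V ih =>
    intro acc
    by_cases h : p L
    · simp [h, ih, List.append_assoc]
    · simp [h, ih]

theorem pairs_eq (start stop : Int) :
    all_pairs start stop
      = (PySem.List.pyRange start (stop + 1) 1).flatMap (fun x =>
          (PySem.List.pyRange x (stop + 1) 1).map (fun y => (x, y))) := by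
  unfold all_pairs
  have h1 : ∀ (acc : List (Int × Int)) (x : Int), x ∈ PySem.List.pyRange start (stop + 1) 1 →
      (PySem.List.pyRange x (stop + 1) 1).foldl (fun pairs y => pairs ++ [(x, y)]) acc
        = acc ++ (PySem.List.pyRange x (stop + 1) 1).map (fun y => (x, y)) :=
    fun acc x _ => PySem.List.foldl_append_singleton_eq_map _ _ _
  have h2 := PySem.List.foldl_congr_mem
      (l := PySem.List.pyRange start (stop + 1) 1)
      (fun pairs x => (PySem.List.pyRange x (stop + 1) 1).foldl
        (fun pairs y => pairs ++ [(x, y)]) pairs)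
      (fun pairs x => pairs ++ (PySem.List.pyRange x (stop + 1) 1).map (fun y => (x, y)))
      [] h1
  exact h2.trans (PySem.List.foldl_append_eq_flatMap _ _ _)

-- A-side grouping dicts, specialised to the two keys (defeq instances of values_groupBy)
theorem values_mul (L : List (Int × Int)) :
    (get_all_pairs_that_multiply_to_p L).values
      = (PySem.Set.ofList (L.map (fun q => q.1 * q.2))).map
          (fun k => L.filter (fun r => r.1 * r.2 == k)) :=
  values_groupBy (fun q => q.1 * q.2) L

theorem values_add (L : List (Int × Int)) :
    (get_all_pairs_that_add_to_s L).values
      = (PySem.Set.ofList (L.map (fun q => q.1 + q.2))).map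
          (fun k => L.filter (fun r => r.1 + r.2 == k)) :=
  values_groupBy (fun q => q.1 + q.2) L

-- membership in A's ambiguous-pair list: exactly the pairs whose product group has ≥ 2 members
theorem mem_amb (pairs : List (Int × Int)) (r : Int × Int) :
    r ∈ get_ambiguous_product_pairs (get_all_pairs_that_multiply_to_p pairs)
      ↔ r ∈ pairs ∧ 1 < (pairs.filter (fun q => q.1 * q.2 == r.1 * r.2)).length := by
  unfold get_ambiguous_product_pairs
  have hg := foldl_gate (fun L => 1 < L.length) (fun L => L)
      (get_all_pairs_that_multiply_to_p pairs).values []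
  rw [hg, values_mul, List.nil_append, List.mem_flatMap]
  constructor
  · rintro ⟨L, hL, hr⟩
    obtain ⟨k, hk, rfl⟩ := List.mem_map.mp hL
    by_cases hlen : 1 < (pairs.filter (fun q => q.1 * q.2 == k)).length
    · rw [if_pos hlen] at hr
      obtain ⟨hrp, hbq⟩ := List.mem_filter.mp hr
      have hkr : r.1 * r.2 = k := by simpa using hbq
      exact ⟨hrp, by rw [hkr]; exact hlen⟩
    · rw [if_neg hlen] at hr
      exact absurd hr (List.not_mem_nil)
  · rintro ⟨hrp, hlen⟩
    refine ⟨pairs.filter (fun q => q.1 * q.2 == r.1 * r.2), ?_, ?_⟩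
    · rw [List.mem_map]
      refine ⟨r.1 * r.2, ?_, rfl⟩
      rw [PySem.Set.mem_ofList]
      exact List.mem_map.mpr ⟨r, hrp, rfl⟩
    · rw [if_pos hlen]
      exact List.mem_filter.mpr ⟨hrp, by simp⟩

-- B's duplicate-product set (the inlined `ambiguous` of the port, as a function of the pair list)
def dupSet (P : List (Int × Int)) : PySem.Set Int :=
  ((PySem.List.sorted (P.map (fun q => q.1 * q.2)) (fun v => v) false).zip
    (PySem.List.slice (PySem.List.sorted (P.map (fun q => q.1 * q.2)) (fun v => v) false)
      (some 1) none)).foldl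
    (fun s ab => if ab.1 == ab.2 then PySem.Set.add s ab.1 else s) PySem.Set.empty

-- membership in B's duplicate-product set
theorem mem_dupset (pairs : List (Int × Int)) (x : Int) :
    x ∈ dupSet pairs ↔ 1 < (pairs.filter (fun q => q.1 * q.2 == x)).length := by
  unfold dupSet
  rw [PySem.List.slice_from_one, mem_foldl_add_if]
  have hpw : (PySem.List.sorted (pairs.map (fun q => q.1 * q.2)) (fun v => v) false).Pairwise
      (· ≤ ·) := by
    simpa using PySem.List.sorted_pairwise (pairs.map (fun q => q.1 * q.2)) (fun v => v)
  rw [show (x ∈ PySem.Set.empty (α := Int)) = False by simp [PySem.Set.empty], false_or,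
    adj_dup_iff_two_le_count _ hpw x,
    (PySem.List.sorted_perm (pairs.map (fun q => q.1 * q.2)) (fun v => v) false).count_eq,
    List.count_eq_countP, List.countP_map, List.countP_eq_length_filter]
  simp only [Function.comp_def]
  omega

theorem all_congr_mem {α : Type} (l : List α) (f g : α → Bool) (h : ∀ x ∈ l, f x = g x) :
    l.all f = l.all g := by
  induction l with
  | nil => rfl
  | cons a t ih =>
    simp only [List.all_cons, h a List.mem_cons_self,
      ih (fun x hx => h x (List.mem_cons_of_mem _ hx))]

theorem ofList_eq_map_firstReps (f : Int × Int → Int) (P : List (Int × Int)) :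
    PySem.Set.ofList (P.map f) = (firstReps f PySem.Set.empty P).map f := by
  have h := map_firstReps f P PySem.Set.empty
  rw [show PySem.Set.ofList (P.map f) = PySem.Set.update PySem.Set.empty (P.map f) from rfl, h]
  rfl

-- Samantha's filtering stage: A's dict-values loop equals B's seen-set loop
-- (amb abstracts A's ambiguous-pair list; hamb is its membership characterisation).
theorem possible_core (P : List (Int × Int)) (amb : List (Int × Int))
    (hamb : ∀ r ∈ P, (amb.contains r = true)
      ↔ 1 < (P.filter (fun q => q.1 * q.2 == r.1 * r.2)).length) :
    (get_all_pairs_that_add_to_s P).values.foldl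
      (fun res L => if L.all (fun x => amb.contains x) then res ++ L else res) []
      = (P.foldl (fun (st : PySem.Set Int × List (Int × Int)) q =>
          if PySem.Set.contains st.1 (q.1 + q.2) then st
          else
            (PySem.Set.add st.1 (q.1 + q.2),
             if (P.filter (fun r => r.1 + r.2 == q.1 + q.2)).all
                  (fun r => PySem.Set.contains (dupSet P) (r.1 * r.2)) then
               st.2 ++ P.filter (fun r => r.1 + r.2 == q.1 + q.2)
             else st.2)) (PySem.Set.empty, [])).2 := by
  have hB : P.foldl (fun (st : PySem.Set Int × List (Int × Int)) q =>
          if PySem.Set.contains st.1 (q.1 + q.2) then st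
          else
            (PySem.Set.add st.1 (q.1 + q.2),
             if (P.filter (fun r => r.1 + r.2 == q.1 + q.2)).all
                  (fun r => PySem.Set.contains (dupSet P) (r.1 * r.2)) then
               st.2 ++ P.filter (fun r => r.1 + r.2 == q.1 + q.2)
             else st.2)) (PySem.Set.empty, [])
      = (PySem.Set.update PySem.Set.empty (P.map (fun q => q.1 + q.2)),
         [] ++ (firstReps (fun q => q.1 + q.2) PySem.Set.empty P).flatMap (fun q =>
           if (P.filter (fun r => r.1 + r.2 == q.1 + q.2)).all
                (fun r => PySem.Set.contains (dupSet P) (r.1 * r.2)) then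
             P.filter (fun r => r.1 + r.2 == q.1 + q.2)
           else [])) := by
    refine Eq.trans ?_ (foldl_seen_loop (fun q => q.1 + q.2) _ P PySem.Set.empty [])
    refine PySem.List.foldl_congr_mem _ _ _ _ ?_
    intro st q _
    split_ifs <;> simp
  rw [hB]
  simp only [List.nil_append]
  have hg := foldl_gate
      (fun L => L.all (fun x => amb.contains x) = true)
      (fun L => L) (get_all_pairs_that_add_to_s P).values []
  rw [hg, values_add, List.nil_append, List.flatMap_map,
    ofList_eq_map_firstReps (fun q => q.1 + q.2) P, List.flatMap_map]
  refine List.flatMap_congr ?_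
  intro q hq
  beta_reduce
  have hgrp : ∀ r ∈ P.filter (fun r => r.1 + r.2 == q.1 + q.2),
      amb.contains r = PySem.Set.contains (dupSet P) (r.1 * r.2) := by
    intro r hr
    have hrP : r ∈ P := (List.mem_filter.mp hr).1
    apply Bool.coe_iff_coe.mp
    rw [hamb r hrP, PySem.Set.contains_iff, mem_dupset]
  rw [all_congr_mem _ _ _ hgrp]

-- Peter's final stage: A's dict-values loop equals B's seen-set loop.
theorem final_core (Q : List (Int × Int)) :
    (get_all_pairs_that_multiply_to_p Q).values.foldl
      (fun acc L => if L.length == 1 then acc ++ (PySem.List.pyGet? L 0).toList else acc) []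
      = (Q.foldl (fun (st : PySem.Set Int × List (Int × Int)) q =>
          if PySem.Set.contains st.1 (q.1 * q.2) then st
          else
            (PySem.Set.add st.1 (q.1 * q.2),
             if Q.countP (fun r => r.1 * r.2 == q.1 * q.2) == 1 then st.2 ++ [q]
             else st.2)) (PySem.Set.empty, [])).2 := by
  have hB : Q.foldl (fun (st : PySem.Set Int × List (Int × Int)) q =>
          if PySem.Set.contains st.1 (q.1 * q.2) then st
          else
            (PySem.Set.add st.1 (q.1 * q.2),
             if Q.countP (fun r => r.1 * r.2 == q.1 * q.2) == 1 then st.2 ++ [q]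
             else st.2)) (PySem.Set.empty, [])
      = (PySem.Set.update PySem.Set.empty (Q.map (fun q => q.1 * q.2)),
         [] ++ (firstReps (fun q => q.1 * q.2) PySem.Set.empty Q).flatMap (fun q =>
           if Q.countP (fun r => r.1 * r.2 == q.1 * q.2) == 1 then [q] else [])) := by
    refine Eq.trans ?_ (foldl_seen_loop (fun q => q.1 * q.2) _ Q PySem.Set.empty [])
    refine PySem.List.foldl_congr_mem _ _ _ _ ?_
    intro st q _
    split_ifs <;> simp
  rw [hB]
  simp only [List.nil_append]
  have hg := foldl_gate (fun L => (L.length == 1) = true)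
      (fun L => (PySem.List.pyGet? L 0).toList) (get_all_pairs_that_multiply_to_p Q).values []
  rw [hg, values_mul, List.nil_append, List.flatMap_map,
    ofList_eq_map_firstReps (fun q => q.1 * q.2) Q, List.flatMap_map]
  refine List.flatMap_congr ?_
  intro q hq
  beta_reduce
  have hcnt : Q.countP (fun r => r.1 * r.2 == q.1 * q.2)
      = (Q.filter (fun r => r.1 * r.2 == q.1 * q.2)).length :=
    List.countP_eq_length_filter
  by_cases h1 : (Q.filter (fun r => r.1 * r.2 == q.1 * q.2)).length = 1
  · have hhead := head_filter_firstReps (fun q => q.1 * q.2) Q PySem.Set.empty q hq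
    have hsingle : Q.filter (fun r => r.1 * r.2 == q.1 * q.2) = [q] := by
      rcases hF : Q.filter (fun r => r.1 * r.2 == q.1 * q.2) with _ | ⟨a, t⟩
      · rw [hF] at h1; simp at h1
      · rw [hF] at hhead h1
        simp only [List.head?_cons, Option.some.injEq] at hhead
        simp only [List.length_cons, Nat.add_eq_right, List.length_eq_zero_iff] at h1
        rw [hF, hhead, h1]
    rw [if_pos (by simp [h1]), if_pos (by rw [hcnt]; simp [h1]), hsingle]
    rfl
  · rw [if_neg (by simpa using h1), if_neg (by rw [hcnt]; simpa using h1)]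

-- the two ports agree
theorem AB_eq (start stop : Int) :
    peter_knows_given_samantha_knows_he_doesnt_know start stop
      = peter_knows_given_samantha_knows_he_doesnt_know_alt start stop := by
  simp only [peter_knows_given_samantha_knows_he_doesnt_know,
    peter_knows_given_samantha_knows_he_doesnt_know_alt,
    samantha_knows_that_peter_doesnt_know_x_and_y_pairs, ← pairs_eq]
  rw [final_core]
  have hamb : ∀ r ∈ all_pairs start stop,
      ((peter_doesnt_know_x_and_y_pairs start stop).contains r = true)
        ↔ 1 < ((all_pairs start stop).filter (fun q => q.1 * q.2 == r.1 * r.2)).length := by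
    intro r hr
    rw [show peter_doesnt_know_x_and_y_pairs start stop
        = get_ambiguous_product_pairs
            (get_all_pairs_that_multiply_to_p (all_pairs start stop)) from rfl,
      List.contains_iff_mem, mem_amb]
    exact ⟨fun h => h.2, fun h => ⟨hr, h⟩⟩
  rw [possible_core (all_pairs start stop) _ hamb]
  rfl

-- ===== VERDICT (by name: the statement is the Claim_ definition above) =====
theorem peter_knows_given_samantha_knows_he_doesnt_know_spec : Claim_equal_peter_knows_given_samantha_knows_he_doesnt_know := by
  intro start stop _
  unfold Spec_peter_knows_given_samantha_knows_he_doesnt_know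
  exact AB_eq start stop
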